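-- pv_equiv track=rewrite | github.com/malekjakub69/knn-math | app/neural_network/predict.py | post_process_latex
-- ===== SOURCE A (Python) =====
-- def post_process_latex(latex_str):
--     """
--     Post-processing LaTeX výrazu pro zvýšení kvality.
--     Opraví běžné chyby a zajistí konzistenci závorek a dalších symbolů.
--     """
--     # Oprava nekonzistentních závorek
--     open_brackets = latex_str.count("{")
--     close_brackets = latex_str.count("}")
--
--     if open_brackets > close_brackets:
--         latex_str += "}" * (open_brackets - close_brackets)
--     elif close_brackets > open_brackets:
--         # Odstraníme přebývající }
--         excess = close_brackets - open_brackets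
--         for _ in range(excess):
--             last_idx = latex_str.rfind("}")
--             if last_idx != -1:
--                 latex_str = latex_str[:last_idx] + latex_str[last_idx + 1 :]
--
--     # Oprava nekonzistentních \left \right
--     left_cmds = latex_str.count("\\left")
--     right_cmds = latex_str.count("\\right")
--
--     if left_cmds > right_cmds:
--         latex_str += "\\right." * (left_cmds - right_cmds)
--
--     # Odstranění opakujících se mezer
--     while "  " in latex_str:
--         latex_str = latex_str.replace("  ", " ")
--
--     # Odstranění mezer na začátku a konci
--     latex_str = latex_str.strip()
--
--     return latex_str
-- ===== SOURCE B (Python) =====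
-- def post_process_latex(latex_str):
--     """Single-pass bracket balancing and space collapsing (O(n))."""
--     s = latex_str
--     open_brackets = s.count("{")
--     close_brackets = s.count("}")
--
--     if open_brackets > close_brackets:
--         s = s + "}" * (open_brackets - close_brackets)
--     elif close_brackets > open_brackets:
--         # keep only the first `open_brackets` closing braces (one pass)
--         keep = open_brackets
--         out = []
--         for ch in s:
--             if ch == "}":
--                 if keep > 0:
--                     out.append(ch)
--                     keep -= 1
--             else:
--                 out.append(ch)
--         s = "".join(out)
--
--     diff = s.count("\\left") - s.count("\\right")
--     if diff > 0:
--         s = s + "\\right." * diff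
--
--     # collapse runs of spaces in a single pass
--     out = []
--     prev_space = False
--     for ch in s:
--         if ch == " ":
--             if not prev_space:
--                 out.append(ch)
--             prev_space = True
--         else:
--             out.append(ch)
--             prev_space = False
--     return "".join(out).strip()
-- ===== Notes on version B (the rewrite author's own statement) =====
-- stated objective: alternative
-- what changed: A's repeated rfind-and-rebuild loop for excess closing braces and its repeated whole-string double-space replace loop are replaced by two single left-to-right passes (a budget counter keeping the first open_brackets closing braces, and a previous-was-space flag collapsing space runs).
import Mathlib
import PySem

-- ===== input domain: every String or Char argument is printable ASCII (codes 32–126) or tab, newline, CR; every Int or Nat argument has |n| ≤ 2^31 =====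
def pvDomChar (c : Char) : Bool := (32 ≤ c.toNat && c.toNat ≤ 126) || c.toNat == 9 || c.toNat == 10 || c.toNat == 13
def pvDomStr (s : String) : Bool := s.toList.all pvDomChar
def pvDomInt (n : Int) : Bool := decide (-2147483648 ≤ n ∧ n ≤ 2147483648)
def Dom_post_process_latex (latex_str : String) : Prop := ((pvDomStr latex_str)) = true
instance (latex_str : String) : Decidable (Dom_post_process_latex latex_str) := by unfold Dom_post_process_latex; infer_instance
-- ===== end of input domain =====

-- B replaces A's rfind-and-rebuild removal loop for excess closing braces and A's
-- repeated whole-string double-space replace loop by two single left-to-right passes.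

-- ===== PORT A =====
-- `rep` characterises one round of Python's `s.replace("  ", " ")`; it and
-- `rep_length_lt` are cited by `aCollapseLoop`'s termination proof, so they live here.
def rep : List Char → List Char
  | [] => []
  | [c] => [c]
  | c :: d :: t => if c = ' ' ∧ d = ' ' then ' ' :: rep t else c :: rep (d :: t)

theorem replace_go_eq (fuel : Nat) : ∀ (l acc : List Char), l.length ≤ fuel →
    PySem.Chars.replace.go [' ', ' '] [' '] fuel l acc = acc.reverse ++ rep l := by
  induction fuel with
  | zero => intro l acc h; simp at h; subst h; simp [PySem.Chars.replace.go, rep]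
  | succ n ih =>
    intro l acc h
    match l with
    | [] => simp [PySem.Chars.replace.go, rep]
    | [c] =>
      rw [PySem.Chars.replace.go]
      rw [if_neg (by simp [List.isPrefixOf])]
      rw [PySem.Chars.replace.go.eq_def]
      match n with
      | 0 => simp [rep]
      | m+1 => simp [rep]
    | c :: d :: t =>
      rw [PySem.Chars.replace.go]
      by_cases hp : c = ' ' ∧ d = ' '
      · obtain ⟨hc, hd⟩ := hp; subst hc; subst hd
        rw [if_pos (by simp [List.isPrefixOf])]
        rw [ih _ _ (by simp at h ⊢; omega)]
        rw [rep, if_pos ⟨rfl, rfl⟩]; simp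
      · rw [if_neg (by simp [List.isPrefixOf]; intro h1 h2; exact hp ⟨h1.symm, h2.symm⟩)]
        rw [ih _ _ (by simp at h ⊢; omega)]
        rw [rep, if_neg hp]; simp

theorem replace_eq_rep (s : List Char) :
    PySem.Chars.replace s [' ', ' '] [' '] = rep s := by
  rw [PySem.Chars.replace, if_neg (by simp)]
  simpa using replace_go_eq s.length s [] le_rfl

theorem rep_length_le (s : List Char) : (rep s).length ≤ s.length := by
  induction s using rep.induct with
  | case1 => simp [rep]
  | case2 c => simp [rep]
  | case3 c d t hcd ih => rw [rep, if_pos hcd]; simpa using by omega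
  | case4 c d t hcd ih => rw [rep, if_neg hcd]; simpa using ih

theorem rep_length_lt (s : List Char) (h : [' ', ' '] <:+: s) :
    (rep s).length < s.length := by
  induction s using rep.induct with
  | case1 => simp at h
  | case2 c =>
    exfalso
    have := h.length_le
    simp at this
  | case3 c d t hcd ih =>
    rw [rep, if_pos hcd]
    have := rep_length_le t
    simp; omega
  | case4 c d t hcd ih =>
    rw [rep, if_neg hcd]
    rcases List.infix_cons_iff.mp h with hpre | hinf
    · exfalso
      rcases hpre with ⟨r, hr⟩
      simp at hr
      exact hcd ⟨hr.1.symm, hr.2.1.symm⟩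
    · simpa using ih hinf

-- A, bracket phase: append missing '}' or repeatedly rfind-and-delete the last '}'
def aRemoveStep (s : List Char) : List Char :=
  let last_idx := PySem.Chars.rfind s ['}']
  if last_idx ≠ -1 then
    PySem.Chars.slice s none (some last_idx) ++ PySem.Chars.slice s (some (last_idx + 1)) none
  else s

def aBrackets (s : List Char) : List Char :=
  let ob := PySem.Chars.count s ['{']
  let cb := PySem.Chars.count s ['}']
  if ob > cb then s ++ List.replicate (ob - cb) '}'
  else if cb > ob then (List.range (cb - ob)).foldl (fun t _ => aRemoveStep t) s
  else s

def aLeftRight (s : List Char) : List Char :=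
  let lc := PySem.Chars.count s "\\left".toList
  let rc := PySem.Chars.count s "\\right".toList
  if lc > rc then s ++ (List.replicate (lc - rc) "\\right.".toList).flatten else s

-- A, space phase: `while "  " in s: s = s.replace("  ", " ")`
def aCollapseLoop (s : List Char) : List Char :=
  if h : PySem.Chars.isIn [' ', ' '] s then
    aCollapseLoop (PySem.Chars.replace s [' ', ' '] [' '])
  else s
termination_by s.length
decreasing_by
  rw [replace_eq_rep]
  exact rep_length_lt s ((PySem.Chars.isIn_iff_infix _ _).mp h)

def post_process_latex (latex_str : String) : String :=
  String.mk (PySem.Chars.strip (aCollapseLoop (aLeftRight (aBrackets latex_str.toList))))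

-- ===== PORT B =====
-- B, bracket phase: one pass keeping only the first `keep` closing braces
def bKeepFirst (keep : Nat) : List Char → List Char
  | [] => []
  | ch :: t =>
    if ch = '}' then
      (if keep > 0 then ch :: bKeepFirst (keep - 1) t else bKeepFirst keep t)
    else ch :: bKeepFirst keep t

def bBrackets (s : List Char) : List Char :=
  let ob := PySem.Chars.count s ['{']
  let cb := PySem.Chars.count s ['}']
  if ob > cb then s ++ List.replicate (ob - cb) '}'
  else if cb > ob then bKeepFirst ob s
  else s

def bLeftRight (s : List Char) : List Char :=
  let d : Int := (PySem.Chars.count s "\\left".toList : Int) - (PySem.Chars.count s "\\right".toList : Int)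
  if d > 0 then s ++ (List.replicate d.toNat "\\right.".toList).flatten else s

-- B, space phase: one pass with a `prev_space` flag
def bCollapse (prev : Bool) : List Char → List Char
  | [] => []
  | ch :: t =>
    if ch = ' ' then
      (if prev then bCollapse true t else ch :: bCollapse true t)
    else ch :: bCollapse false t

def post_process_latex_alt (latex_str : String) : String :=
  String.mk (PySem.Chars.strip (bCollapse false (bLeftRight (bBrackets latex_str.toList))))

-- ===== PRECONDITION & SPEC =====
def Spec_post_process_latex (latex_str : String) (out : String) : Prop := out = post_process_latex_alt latex_str
instance (latex_str : String) (out : String) : Decidable (Spec_post_process_latex latex_str out) := by unfold Spec_post_process_latex; infer_instance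

-- ===== CLAIM (what is proved, stated in full; the proofs are below) =====
def Claim_equal_post_process_latex : Prop := ∀ (latex_str : String), Dom_post_process_latex latex_str → Spec_post_process_latex latex_str (post_process_latex latex_str)

-- ===== LEMMAS AND PROOFS =====

theorem count_singleton (c : Char) (s : List Char) :
    PySem.Chars.count s [c] = s.count c := by
  rw [PySem.Chars.count, if_neg (by simp)]
  suffices h : ∀ fuel (l : List Char) acc, l.length ≤ fuel →
      PySem.Chars.count.go [c] fuel l acc = acc + l.count c by
    simpa using h s.length s 0 le_rfl
  intro fuel
  induction fuel with
  | zero => intro l acc h; simp at h; subst h; simp [PySem.Chars.count.go]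
  | succ n ih =>
    intro l acc h
    match l with
    | [] => simp [PySem.Chars.count.go]
    | x :: t =>
      have ht : t.length ≤ n := by simp at h; omega
      rw [PySem.Chars.count.go]
      by_cases hx : c = x
      · subst hx
        rw [if_pos (by simp [List.isPrefixOf])]
        have hdrop : List.drop [c].length (c :: t) = t := by simp
        rw [hdrop, ih t (acc+1) ht]
        simp
        omega
      · rw [if_neg (by simp [List.isPrefixOf]; exact hx)]
        rw [ih t acc ht]
        simp [Ne.symm hx]

theorem rfind_go_last (u v : List Char) (h : '}' ∉ v) :
    ∀ k, PySem.Chars.rfind.go (u ++ '}' :: v) ['}'] (u.length + k) = u.length := by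
  intro k
  induction k with
  | zero =>
    rw [Nat.add_zero]
    cases u with
    | nil => simp [PySem.Chars.rfind.go, List.isPrefixOf]
    | cons a u' =>
      rw [show (a :: u').length = u'.length + 1 by simp]
      rw [PySem.Chars.rfind.go]
      rw [if_pos (by simp [List.isPrefixOf])]
  | succ k ih =>
    rw [show u.length + (k+1) = (u.length + k) + 1 by omega]
    rw [PySem.Chars.rfind.go]
    rw [if_neg ?_]
    · exact ih
    · have hdrop : List.drop (u.length + k + 1) (u ++ '}' :: v) = List.drop k v := by
        rw [show u.length + k + 1 = u.length + (k + 1) by omega]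
        rw [List.drop_append]
        simp
      rw [hdrop]
      match hd : List.drop k v with
      | [] => simp [List.isPrefixOf]
      | x :: r =>
        have hxv : x ∈ v := List.mem_of_mem_drop (by rw [hd]; simp)
        have hx : ¬ x = '}' := fun hh => h (hh ▸ hxv)
        simp [List.isPrefixOf]
        intro hh; exact hx hh.symm

theorem rfind_last (u v : List Char) (h : '}' ∉ v) :
    PySem.Chars.rfind (u ++ '}' :: v) ['}'] = u.length := by
  rw [PySem.Chars.rfind]
  rw [show (u ++ '}' :: v).length = u.length + (v.length + 1) by rw [List.length_append, List.length_cons]]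
  exact rfind_go_last u v h _

theorem aRemoveStep_eq (u v : List Char) (h : '}' ∉ v) :
    aRemoveStep (u ++ '}' :: v) = u ++ v := by
  rw [aRemoveStep]
  simp only [rfind_last u v h]
  rw [if_pos (by omega : ((u.length : Int) ≠ -1))]
  have h1 : PySem.Chars.slice (u ++ '}' :: v) none (some (u.length : Int)) = u := by
    simp [pysem]
  have h2 : PySem.Chars.slice (u ++ '}' :: v) (some ((u.length : Int) + 1)) none = v := by
    have : ((u.length : Int) + 1) = ((u.length + 1 : Nat) : Int) := by push_cast; ring
    rw [this]
    simp only [PySem.Chars.slice_eq_listSlice]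
    rw [PySem.List.slice_from _ (by positivity)]
    rw [Int.toNat_natCast]
    rw [List.drop_append]
    simp
  rw [h1, h2]

theorem last_brace_split (s : List Char) (h : '}' ∈ s) :
    ∃ u v, s = u ++ '}' :: v ∧ '}' ∉ v := by
  induction s with
  | nil => simp at h
  | cons c t ih =>
    by_cases ht : '}' ∈ t
    · obtain ⟨u, v, rfl, hv⟩ := ih ht
      exact ⟨c :: u, v, rfl, hv⟩
    · have hc : c = '}' := by
        rcases List.mem_cons.mp h with h1 | h2
        · exact h1.symm
        · exact absurd h2 ht
      subst hc
      exact ⟨[], t, rfl, ht⟩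

theorem keep_all (s : List Char) : ∀ o, s.count '}' ≤ o → bKeepFirst o s = s := by
  induction s with
  | nil => intro o _; simp [bKeepFirst]
  | cons c t ih =>
    intro o h
    by_cases hc : c = '}'
    · subst hc
      have : t.count '}' + 1 ≤ o := by simpa using h
      rw [bKeepFirst, if_pos rfl, if_pos (by omega)]
      rw [ih (o-1) (by omega)]
    · rw [bKeepFirst, if_neg hc, ih o (by simp [List.count_cons, hc] at h ⊢; omega)]

theorem keep_append (x : List Char) : ∀ (o : Nat) (y : List Char),
    bKeepFirst o (x ++ y) = bKeepFirst o x ++ bKeepFirst (o - x.count '}') y := by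
  induction x with
  | nil => intro o y; simp [bKeepFirst]
  | cons c t ih =>
    intro o y
    by_cases hc : c = '}'
    · subst hc
      by_cases ho : o > 0
      · rw [List.cons_append, bKeepFirst, if_pos rfl, if_pos ho,
            bKeepFirst, if_pos rfl, if_pos ho, ih]
        simp [List.count_cons]
        congr 1
        omega
      · have ho0 : o = 0 := by omega
        subst ho0
        rw [List.cons_append, bKeepFirst, if_pos rfl, if_neg (by omega),
            bKeepFirst, if_pos rfl, if_neg (by omega), ih]
        simp
    · rw [List.cons_append, bKeepFirst, if_neg hc, bKeepFirst, if_neg hc, ih]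
      simp [hc]

theorem iter_remove_eq (n : Nat) : ∀ (s : List Char), n ≤ s.count '}' →
    (List.range n).foldl (fun t _ => aRemoveStep t) s = bKeepFirst (s.count '}' - n) s := by
  induction n with
  | zero =>
    intro s _
    simp [keep_all s (s.count '}') le_rfl]
  | succ n ih =>
    intro s h
    have hmem : '}' ∈ s := List.count_pos_iff.mp (by omega)
    obtain ⟨u, v, rfl, hv⟩ := last_brace_split s hmem
    have hv0 : v.count '}' = 0 := List.count_eq_zero.mpr hv
    have hcnt : (u ++ '}' :: v).count '}' = u.count '}' + 1 := by
      simp [List.count_append, List.count_cons, hv0]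
    rw [List.range_succ_eq_map]
    rw [List.foldl_cons, List.foldl_map]
    rw [aRemoveStep_eq u v hv]
    have hcnt2 : (u ++ v).count '}' = u.count '}' := by
      simp [List.count_append, hv0]
    rw [ih (u ++ v) (by rw [hcnt2]; rw [hcnt] at h; omega)]
    rw [hcnt, hcnt2]
    have ho : u.count '}' + 1 - (n + 1) = u.count '}' - n := by omega
    rw [ho]
    rw [keep_append, keep_append]
    congr 1
    have hle : u.count '}' - n ≤ u.count '}' := by omega
    have h0 : u.count '}' - n - u.count '}' = 0 := by omega
    rw [h0]
    rw [bKeepFirst, if_pos rfl, if_neg (by omega)]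

theorem brackets_eq (s : List Char) : aBrackets s = bBrackets s := by
  rw [aBrackets, bBrackets]
  by_cases h1 : PySem.Chars.count s ['{'] > PySem.Chars.count s ['}']
  · rw [if_pos h1, if_pos h1]
  · rw [if_neg h1, if_neg h1]
    by_cases h2 : PySem.Chars.count s ['}'] > PySem.Chars.count s ['{']
    · rw [if_pos h2, if_pos h2]
      rw [count_singleton, count_singleton] at h1 h2 ⊢
      rw [iter_remove_eq _ s (by omega)]
      congr 1
      omega
    · rw [if_neg h2, if_neg h2]

theorem leftright_eq (s : List Char) : aLeftRight s = bLeftRight s := by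
  rw [aLeftRight, bLeftRight]
  generalize PySem.Chars.count s "\\left".toList = lc
  generalize PySem.Chars.count s "\\right".toList = rc
  by_cases h : lc > rc
  · rw [if_pos h, if_pos (by omega : ((lc:Int) - rc > 0))]
    rw [show ((lc:Int) - rc).toNat = lc - rc by omega]
  · rw [if_neg h, if_neg (by omega : ¬ ((lc:Int) - rc > 0))]

theorem collapse_rep (s : List Char) : ∀ b, bCollapse b (rep s) = bCollapse b s := by
  induction s using rep.induct with
  | case1 => intro b; simp [rep]
  | case2 c => intro b; simp [rep]
  | case3 c d t hcd ih =>
    intro b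
    obtain ⟨hc, hd⟩ := hcd; subst hc; subst hd
    rw [rep, if_pos ⟨rfl, rfl⟩]
    cases b <;> simp [bCollapse, ih true]
  | case4 c d t hcd ih =>
    intro b
    rw [rep, if_neg hcd]
    by_cases hc : c = ' '
    · subst hc
      cases b <;> simp [bCollapse, ih true]
    · cases b <;> simp [bCollapse, hc, ih false]

theorem collapse_no_double (s : List Char) (h : ¬ ([' ', ' '] <:+: s)) :
    bCollapse false s = s := by
  induction s with
  | nil => simp [bCollapse]
  | cons c t ih =>
    have ht : ¬ ([' ',' '] <:+: t) := fun h2 => h (List.infix_cons_iff.mpr (Or.inr h2))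
    by_cases hc : c = ' '
    · subst hc
      match t with
      | [] => simp [bCollapse]
      | d :: t' =>
        have hd : ¬ d = ' ' := by
          intro hd; subst hd
          exact h ⟨[], t', rfl⟩
        have ih' : bCollapse false t' = t' := by
          have := ih ht
          rw [bCollapse, if_neg hd] at this
          simpa using this
        simp [bCollapse, hd, ih']
    · rw [bCollapse, if_neg hc, ih ht]

theorem collapse_loop_eq (s : List Char) : aCollapseLoop s = bCollapse false s := by
  induction s using aCollapseLoop.induct with
  | case1 s h ih =>
    rw [aCollapseLoop, dif_pos h, ih, replace_eq_rep, collapse_rep]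
  | case2 s h =>
    rw [aCollapseLoop, dif_neg h]
    rw [collapse_no_double s (fun h2 => h ((PySem.Chars.isIn_iff_infix _ _).mpr h2))]

-- ===== VERDICT (by name: the statement is the Claim_ definition above) =====
theorem post_process_latex_spec : Claim_equal_post_process_latex := by
  intro s _
  unfold Spec_post_process_latex post_process_latex post_process_latex_alt
  rw [brackets_eq, leftright_eq, collapse_loop_eq]
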